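-- pv_equiv track=rewrite | github.com/sleepingF0x/zlib-download-skill | skills/zlib-download/scripts/book.py | _extract_annas_error
-- ===== SOURCE A (Python) =====
-- def _extract_annas_error(stderr: str) -> str:
--     """Extract the useful error message from annas-mcp verbose output."""
--     # Look for the last ERROR line with a human-readable message
--     for line in reversed(stderr.strip().splitlines()):
--         line = line.strip()
--         if line.startswith("Failed to"):
--             return line
--         if "ERROR" in line and "environment variables must be set" in line:
--             return "ANNAS_SECRET_KEY and ANNAS_DOWNLOAD_PATH must be set"
--     # Fallback: last non-empty line
--     lines = [l.strip() for l in stderr.strip().splitlines() if l.strip()]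
--     return lines[-1] if lines else "Unknown error"
-- ===== SOURCE B (Python) =====
-- def _extract_annas_error(stderr: str) -> str:
--     """Extract the useful error message from annas-mcp verbose output."""
--     # Single forward pass: remember the most recent matching line and the
--     # most recent non-empty line; decide at the end.
--     match_result = None
--     last_nonempty = None
--     for line in stderr.strip().splitlines():
--         line = line.strip()
--         if line.startswith("Failed to"):
--             match_result = line
--         elif "ERROR" in line and "environment variables must be set" in line:
--             match_result = "ANNAS_SECRET_KEY and ANNAS_DOWNLOAD_PATH must be set"
--         if line:
--             last_nonempty = line
--     if match_result is not None:
--         return match_result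
--     if last_nonempty is not None:
--         return last_nonempty
--     return "Unknown error"
-- ===== Notes on version B (the rewrite author's own statement) =====
-- stated objective: alternative
-- what changed: Replaces A's reverse early-return scan plus a separate second fallback pass (list comprehension + last element) with a single forward pass maintaining two accumulators (last matching line, last non-empty line) and deciding at the end.
import Mathlib
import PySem

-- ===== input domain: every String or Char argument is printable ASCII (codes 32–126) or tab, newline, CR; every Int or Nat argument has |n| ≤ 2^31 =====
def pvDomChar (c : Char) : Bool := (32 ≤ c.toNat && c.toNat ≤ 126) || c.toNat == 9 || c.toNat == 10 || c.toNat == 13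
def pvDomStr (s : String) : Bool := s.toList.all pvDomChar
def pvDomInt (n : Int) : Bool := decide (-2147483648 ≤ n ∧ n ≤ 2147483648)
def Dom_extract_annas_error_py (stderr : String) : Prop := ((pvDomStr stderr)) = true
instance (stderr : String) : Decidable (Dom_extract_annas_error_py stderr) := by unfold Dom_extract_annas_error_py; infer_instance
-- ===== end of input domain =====

-- B is a single forward pass with two accumulators instead of A's reverse scan plus a second fallback pass; same result, alternative decomposition.

-- ===== PORT A =====
def pvMsg : List Char := "ANNAS_SECRET_KEY and ANNAS_DOWNLOAD_PATH must be set".toList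

-- A's reverse early-return loop
def pvALoop : List (List Char) → Option (List Char)
  | [] => none
  | l :: rest =>
      let s := PySem.Chars.strip l
      if PySem.Chars.startswith s "Failed to".toList then some s
      else if PySem.Chars.isIn "ERROR".toList s && PySem.Chars.isIn "environment variables must be set".toList s then some pvMsg
      else pvALoop rest

def extract_annas_error_py (stderr : String) : String :=
  let base := PySem.Chars.splitlines (PySem.Chars.strip stderr.toList)
  match pvALoop base.reverse with
  | some r => String.ofList r
  | none =>
      -- fallback: lines = [l.strip() for l in ... if l.strip()]; lines[-1] if lines else "Unknown error"
      let lines := (base.map PySem.Chars.strip).filter (fun s => s ≠ [])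
      match lines.getLast? with
      | some l => String.ofList l
      | none => "Unknown error"

-- ===== PORT B =====
-- B's single forward step: update (match_result, last_nonempty)
def pvBStep (st : Option (List Char) × Option (List Char)) (line : List Char) :
    Option (List Char) × Option (List Char) :=
  let s := PySem.Chars.strip line
  let m := if PySem.Chars.startswith s "Failed to".toList then some s
           else if PySem.Chars.isIn "ERROR".toList s && PySem.Chars.isIn "environment variables must be set".toList s then
             some "ANNAS_SECRET_KEY and ANNAS_DOWNLOAD_PATH must be set".toList
           else st.1
  let ln := if s ≠ [] then some s else st.2
  (m, ln)

def extract_annas_error_py_alt (stderr : String) : String :=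
  let st := (PySem.Chars.splitlines (PySem.Chars.strip stderr.toList)).foldl pvBStep (none, none)
  match st.1 with
  | some r => String.ofList r
  | none =>
      match st.2 with
      | some l => String.ofList l
      | none => "Unknown error"

-- ===== PRECONDITION & SPEC =====
def Spec_extract_annas_error_py (stderr : String) (out : String) : Prop := out = extract_annas_error_py_alt stderr
instance (stderr : String) (out : String) : Decidable (Spec_extract_annas_error_py stderr out) := by unfold Spec_extract_annas_error_py; infer_instance

-- ===== CLAIM (what is proved, stated in full; the proofs are below) =====
def Claim_equal_extract_annas_error_py : Prop := ∀ (stderr : String), Dom_extract_annas_error_py stderr → Spec_extract_annas_error_py stderr (extract_annas_error_py stderr)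

-- ===== LEMMAS AND PROOFS =====

-- first-some choice, written out to avoid Option.orElse thunks
def pvOr {α : Type} : Option α → Option α → Option α
  | some x, _ => some x
  | none, b => b

-- last non-empty stripped line of ls (A's fallback value)
def pvLastNE (ls : List (List Char)) : Option (List Char) :=
  ((ls.map PySem.Chars.strip).filter (fun s => s ≠ [])).getLast?

lemma pvOr_none {α : Type} (a : Option α) : pvOr a none = a := by cases a <;> rfl

lemma pvOr_assoc {α : Type} (a b c : Option α) : pvOr (pvOr a b) c = pvOr a (pvOr b c) := by
  cases a <;> rfl

lemma pvALoop_append (xs ys : List (List Char)) :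
    pvALoop (xs ++ ys) = pvOr (pvALoop xs) (pvALoop ys) := by
  induction xs with
  | nil => simp [pvALoop, pvOr]
  | cons l rest ih =>
      simp only [List.cons_append, pvALoop]
      split_ifs <;> simp [pvOr, ih]

lemma pvGetLast?_cons {α : Type} (a : α) (t : List α) :
    (a :: t).getLast? = pvOr t.getLast? (some a) := by
  cases t with
  | nil => rfl
  | cons c u => simp only [List.getLast?_cons, Option.getD_some, pvOr]

lemma pvLastNE_cons (l : List Char) (rest : List (List Char)) :
    pvLastNE (l :: rest) =
      pvOr (pvLastNE rest)
        (if PySem.Chars.strip l ≠ [] then some (PySem.Chars.strip l) else none) := by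
  unfold pvLastNE
  simp only [List.map_cons, List.filter_cons]
  by_cases h : PySem.Chars.strip l = []
  · rw [if_neg (by simp [h]), if_neg (by simp [h]), pvOr_none]
  · rw [if_pos (by simp [h]), if_pos (by simp [h]), pvGetLast?_cons]

lemma pvBStep_fst (st : Option (List Char) × Option (List Char)) (l : List Char) :
    (pvBStep st l).1 = pvOr (pvALoop [l]) st.1 := by
  simp only [pvBStep, pvALoop]
  split_ifs <;> rfl

lemma pvBStep_snd (st : Option (List Char) × Option (List Char)) (l : List Char) :
    (pvBStep st l).2 =
      pvOr (if PySem.Chars.strip l ≠ [] then some (PySem.Chars.strip l) else none) st.2 := by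
  simp only [pvBStep]
  split_ifs <;> rfl

lemma pvFoldl_spec (ls : List (List Char)) (m ln : Option (List Char)) :
    ls.foldl pvBStep (m, ln) = (pvOr (pvALoop ls.reverse) m, pvOr (pvLastNE ls) ln) := by
  induction ls generalizing m ln with
  | nil => simp [pvALoop, pvLastNE, pvOr]
  | cons l rest ih =>
      rw [List.foldl_cons]
      have hst : pvBStep (m, ln) l =
          (pvOr (pvALoop [l]) m,
           pvOr (if PySem.Chars.strip l ≠ [] then some (PySem.Chars.strip l) else none) ln) := by
        rw [Prod.ext_iff]
        exact ⟨pvBStep_fst _ _, pvBStep_snd _ _⟩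
      rw [hst, ih, List.reverse_cons, pvALoop_append, pvLastNE_cons, pvOr_assoc, pvOr_assoc]

-- ===== VERDICT (by name: the statement is the Claim_ definition above) =====
theorem extract_annas_error_py_spec : Claim_equal_extract_annas_error_py := by
  intro stderr _
  unfold Spec_extract_annas_error_py extract_annas_error_py extract_annas_error_py_alt
  rw [pvFoldl_spec, pvOr_none, pvOr_none]
  dsimp only
  cases pvALoop (PySem.Chars.splitlines (PySem.Chars.strip stderr.toList)).reverse <;> rfl
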